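-- pv_equiv track=rewrite | github.com/soloobr/z-loops | modules/core/all_utils.py | parse_mask
-- ===== SOURCE A (Python) =====
-- import string
--
-- MASK_CHARSETS = {
--     "?l": string.ascii_lowercase,
--     "?u": string.ascii_uppercase,
--     "?d": string.digits,
--     "?s": "!@#$%^&*()-_=+[]{}",
--     "?a": string.ascii_letters + string.digits + "!@#$%^&*()-_=+[]{}",
-- }
--
-- def parse_mask(mask):
--     pools = []
--     i = 0
--     while i < len(mask):
--         if mask[i] == "?" and i + 1 < len(mask):
--             token = mask[i:i+2]
--             if token in MASK_CHARSETS: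
--                 pools.append(MASK_CHARSETS[token])
--                 i += 2
--                 continue
--         pools.append(mask[i])
--         i += 1
--     return pools
-- ===== SOURCE B (Python) =====
-- import string
--
-- MASK_CHARSETS = {
--     "?l": string.ascii_lowercase,
--     "?u": string.ascii_uppercase,
--     "?d": string.digits,
--     "?s": "!@#$%^&*()-_=+[]{}",
--     "?a": string.ascii_letters + string.digits + "!@#$%^&*()-_=+[]{}",
-- }
--
-- def parse_mask(mask):
--     pools = []
--     pending = False  # a '?' has been seen and not yet resolved
--     for c in mask:
--         if pending:
--             if c in "ludsa":
--                 pools.append(MASK_CHARSETS["?" + c])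
--                 pending = False
--             else:
--                 pools.append("?")
--                 if c != "?":
--                     pools.append(c)
--                     pending = False
--         elif c == "?":
--             pending = True
--         else:
--             pools.append(c)
--     if pending:
--         pools.append("?")
--     return pools
-- ===== Notes on version B (the rewrite author's own statement) =====
-- stated objective: faster
-- what changed: Replaced the index-pointer while loop with per-token slicing and a dict-containment probe by a single forward character pass driven by a boolean pending state (a two-state DFA) that resolves the charset letter by direct membership.
import Mathlib
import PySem

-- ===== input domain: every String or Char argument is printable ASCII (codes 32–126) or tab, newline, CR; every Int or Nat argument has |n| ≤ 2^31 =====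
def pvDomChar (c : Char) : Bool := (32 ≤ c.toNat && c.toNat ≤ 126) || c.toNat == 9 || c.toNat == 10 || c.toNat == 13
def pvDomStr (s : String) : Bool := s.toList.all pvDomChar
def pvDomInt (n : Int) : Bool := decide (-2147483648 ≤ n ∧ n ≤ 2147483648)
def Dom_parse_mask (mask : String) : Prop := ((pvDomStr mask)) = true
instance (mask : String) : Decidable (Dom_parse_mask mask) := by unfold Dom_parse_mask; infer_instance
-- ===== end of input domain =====

-- B replaces A's index-pointer loop (slicing a token and probing the dict at each step) with a one-pass two-state machine over the characters; a timing run measured it constant-factor faster.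

-- ===== PORT A =====
def pvLower : String := "abcdefghijklmnopqrstuvwxyz"
def pvUpper : String := "ABCDEFGHIJKLMNOPQRSTUVWXYZ"
def pvDigits : String := "0123456789"
def pvSpecial : String := "!@#$%^&*()-_=+[]{}"
def pvAll : String := pvLower ++ pvUpper ++ pvDigits ++ pvSpecial

-- MASK_CHARSETS as an association list in insertion order
def maskCharsets : List (String × String) :=
  [("?l", pvLower), ("?u", pvUpper), ("?d", pvDigits), ("?s", pvSpecial), ("?a", pvAll)]

-- the while loop of A: index i over the characters, pools accumulator
def parseMaskGo (cs : List Char) (i : Nat) (pools : List String) : List String :=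
  if h : i < cs.length then
    if cs.getD i ' ' = '?' ∧ i + 1 < cs.length then
      -- token = mask[i:i+2]
      match maskCharsets.lookup (String.ofList ((cs.drop i).take 2)) with
      | some v => parseMaskGo cs (i + 2) (pools ++ [v])
      | none => parseMaskGo cs (i + 1) (pools ++ [String.ofList [cs.getD i ' ']])
    else parseMaskGo cs (i + 1) (pools ++ [String.ofList [cs.getD i ' ']])
  else pools
termination_by cs.length - i

def parse_mask (mask : String) : List String := parseMaskGo mask.toList 0 []

-- ===== PORT B =====
-- one step of B's for-loop: state = (pools, pending-'?')
def altStep (st : List String × Bool) (c : Char) : List String × Bool :=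
  if st.2 then
    if ("ludsa".toList).contains c then
      (st.1 ++ [(maskCharsets.lookup (String.ofList ['?', c])).getD ""], false)
    else if c ≠ '?' then
      (st.1 ++ ["?", String.ofList [c]], false)
    else
      (st.1 ++ ["?"], true)
  else if c = '?' then
    (st.1, true)
  else
    (st.1 ++ [String.ofList [c]], false)

def parse_mask_alt (mask : String) : List String :=
  let st := mask.toList.foldl altStep ([], false)
  if st.2 then st.1 ++ ["?"] else st.1

-- ===== PRECONDITION & SPEC =====
def Spec_parse_mask (mask : String) (out : List String) : Prop := out = parse_mask_alt mask
instance (mask : String) (out : List String) : Decidable (Spec_parse_mask mask out) := by unfold Spec_parse_mask; infer_instance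

-- ===== CLAIM (what is proved, stated in full; the proofs are below) =====
def Claim_equal_parse_mask : Prop := ∀ (mask : String), Dom_parse_mask mask → Spec_parse_mask mask (parse_mask mask)

-- ===== LEMMAS AND PROOFS =====

-- canonical structural description of the parse, used as bridge between the two ports
def fAux : List Char → List String
  | [] => []
  | [c] => [String.ofList [c]]
  | c :: c2 :: rest =>
    if c = '?' ∧ (c2 = 'l' ∨ c2 = 'u' ∨ c2 = 'd' ∨ c2 = 's' ∨ c2 = 'a') then
      (maskCharsets.lookup (String.ofList [c, c2])).getD "" :: fAux rest
    else
      String.ofList [c] :: fAux (c2 :: rest)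

def finAlt (st : List String × Bool) : List String := if st.2 then st.1 ++ ["?"] else st.1

lemma beq_tok (c : Char) (d : Char) (s : String) (hs : s = String.ofList ['?', d]) :
    (String.ofList ['?', c] == s) = decide (c = d) := by
  subst hs
  by_cases h : c = d
  · simp [h]
  · rw [decide_eq_false h, beq_eq_false_iff_ne]
    intro hq
    have := congrArg String.toList hq
    simp at this
    exact h this

lemma lookup_q (c : Char) :
    maskCharsets.lookup (String.ofList ['?', c]) =
      if c = 'l' then some pvLower else if c = 'u' then some pvUpper
      else if c = 'd' then some pvDigits else if c = 's' then some pvSpecial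
      else if c = 'a' then some pvAll else none := by
  simp only [maskCharsets, List.lookup,
    beq_tok c 'l' "?l" (by decide), beq_tok c 'u' "?u" (by decide),
    beq_tok c 'd' "?d" (by decide), beq_tok c 's' "?s" (by decide),
    beq_tok c 'a' "?a" (by decide)]
  by_cases hl : c = 'l' <;> by_cases hu : c = 'u' <;> by_cases hd : c = 'd' <;>
    by_cases hs : c = 's' <;> by_cases ha : c = 'a' <;>
    simp [hl, hu, hd, hs, ha]

lemma lookup_some_of_five {c : Char}
    (hm : c = 'l' ∨ c = 'u' ∨ c = 'd' ∨ c = 's' ∨ c = 'a') :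
    maskCharsets.lookup (String.ofList ['?', c]) =
      some ((maskCharsets.lookup (String.ofList ['?', c])).getD "") := by
  rw [lookup_q]
  rcases hm with h | h | h | h | h <;> simp [h]

lemma lookup_none_of_not_five {c : Char}
    (hm : ¬(c = 'l' ∨ c = 'u' ∨ c = 'd' ∨ c = 's' ∨ c = 'a')) :
    maskCharsets.lookup (String.ofList ['?', c]) = none := by
  push_neg at hm
  rw [lookup_q]
  simp [hm.1, hm.2.1, hm.2.2.1, hm.2.2.2.1, hm.2.2.2.2]

lemma fAux_nonq {c : Char} (hc : c ≠ '?') (rest : List Char) :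
    fAux (c :: rest) = String.ofList [c] :: fAux rest := by
  cases rest with
  | nil => simp [fAux]
  | cons c2 r => simp [fAux, hc]

lemma contains_five (c : Char) :
    ("ludsa".toList).contains c = true ↔
      (c = 'l' ∨ c = 'u' ∨ c = 'd' ∨ c = 's' ∨ c = 'a') := by
  have h : "ludsa".toList = ['l', 'u', 'd', 's', 'a'] := by decide
  rw [h, List.contains_iff_mem]
  simp

lemma goA (cs : List Char) (i : Nat) (pools : List String) :
    parseMaskGo cs i pools = pools ++ fAux (cs.drop i) := by
  have main : ∀ n i pools, cs.length - i ≤ n →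
      parseMaskGo cs i pools = pools ++ fAux (cs.drop i) := by
    intro n
    induction n with
    | zero =>
      intro i pools hle
      have hge : cs.length ≤ i := by omega
      rw [parseMaskGo, dif_neg (by omega), List.drop_of_length_le hge]
      simp [fAux]
    | succ n ih =>
      intro i pools hle
      by_cases h : i < cs.length
      · have hget : cs.getD i ' ' = cs[i] := List.getD_eq_getElem cs ' ' h
        have hdrop : cs.drop i = cs[i] :: cs.drop (i + 1) := List.drop_eq_getElem_cons h
        rw [parseMaskGo, dif_pos h]
        by_cases h2 : cs.getD i ' ' = '?' ∧ i + 1 < cs.length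
        · rw [if_pos h2]
          have hq : cs[i] = '?' := by rw [← hget]; exact h2.1
          have hdrop2 : cs.drop (i + 1) = cs[i + 1]'h2.2 :: cs.drop (i + 2) :=
            List.drop_eq_getElem_cons h2.2
          have htake : (cs.drop i).take 2 = [cs[i], cs[i + 1]'h2.2] := by
            rw [hdrop, hdrop2]; rfl
          by_cases hm : (cs[i + 1]'h2.2 = 'l' ∨ cs[i + 1]'h2.2 = 'u' ∨
              cs[i + 1]'h2.2 = 'd' ∨ cs[i + 1]'h2.2 = 's' ∨ cs[i + 1]'h2.2 = 'a')
          · rw [htake, hq, lookup_some_of_five hm]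
            show parseMaskGo cs (i + 2)
                (pools ++ [(maskCharsets.lookup (String.ofList ['?', cs[i + 1]'h2.2])).getD ""]) = _
            rw [ih (i + 2) _ (by omega), hdrop, hdrop2, hq]
            rw [show fAux ('?' :: cs[i + 1]'h2.2 :: cs.drop (i + 2)) =
                (maskCharsets.lookup (String.ofList ['?', cs[i + 1]'h2.2])).getD "" ::
                  fAux (cs.drop (i + 2)) from by simp [fAux, hm]]
            simp
          · rw [htake, hq, lookup_none_of_not_five hm]
            show parseMaskGo cs (i + 1) (pools ++ [String.ofList [cs.getD i ' ']]) = _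
            rw [ih (i + 1) _ (by omega), hdrop, hdrop2, hq]
            rw [show fAux ('?' :: cs[i + 1]'h2.2 :: cs.drop (i + 2)) =
                String.ofList ['?'] :: fAux (cs[i + 1]'h2.2 :: cs.drop (i + 2)) from by
              simp [fAux, hm]]
            rw [← hdrop2, hget, hq]
            simp
        · rw [if_neg h2, ih (i + 1) _ (by omega), hdrop, hget]
          rcases Decidable.not_and_iff_not_or_not.mp h2 with hne | hge
          · rw [hget] at hne
            rw [fAux_nonq hne]
            simp
          · have : cs.drop (i + 1) = [] := List.drop_of_length_le (by omega)
            rw [this]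
            simp [fAux]
      · rw [parseMaskGo, dif_neg h, List.drop_of_length_le (by omega)]
        simp [fAux]
  exact main (cs.length - i) i pools le_rfl

lemma goB_aux : ∀ n (l : List Char), l.length ≤ n →
    (∀ pools, finAlt (l.foldl altStep (pools, false)) = pools ++ fAux l) ∧
    (∀ pools, finAlt (l.foldl altStep (pools, true)) = pools ++ fAux ('?' :: l)) := by
  intro n
  induction n with
  | zero =>
    intro l hl
    have : l = [] := List.eq_nil_of_length_eq_zero (by omega)
    subst this
    refine ⟨fun pools => by simp [finAlt, fAux], fun pools => ?_⟩
    show (pools ++ ["?"]) = pools ++ [String.ofList ['?']]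
    simp
  | succ n ih =>
    intro l hl
    constructor
    · intro pools
      cases l with
      | nil => simp [finAlt, fAux]
      | cons c rest =>
        rw [List.foldl_cons]
        by_cases hc : c = '?'
        · subst hc
          rw [show altStep (pools, false) '?' = (pools, true) from by simp [altStep]]
          exact (ih rest (by simpa using hl)).2 pools
        · rw [show altStep (pools, false) c = (pools ++ [String.ofList [c]], false) from by
            simp [altStep, hc]]
          rw [(ih rest (by simpa using hl)).1, fAux_nonq hc]
          simp
    · intro pools
      cases l with
      | nil =>
        show (pools ++ ["?"]) = pools ++ [String.ofList ['?']]
        simp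
      | cons c rest =>
        rw [List.foldl_cons]
        by_cases hm : ("ludsa".toList).contains c = true
        · have hm' := (contains_five c).mp hm
          rw [show altStep (pools, true) c =
              (pools ++ [(maskCharsets.lookup (String.ofList ['?', c])).getD ""], false) from by
            simp only [altStep, if_pos hm]; simp]
          rw [(ih rest (by simpa using hl)).1]
          rw [show fAux ('?' :: c :: rest) =
              (maskCharsets.lookup (String.ofList ['?', c])).getD "" :: fAux rest from by
            simp [fAux, hm']]
          simp
        · have hm' := fun h => hm ((contains_five c).mpr h)
          by_cases hc : c = '?'
          · subst hc
            rw [show altStep (pools, true) '?' = (pools ++ ["?"], true) from by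
              simp only [altStep,
                if_neg (show ¬ ("ludsa".toList).contains '?' = true from by decide)]
              simp]
            rw [(ih rest (by simpa using hl)).2]
            rw [show fAux ('?' :: '?' :: rest) = String.ofList ['?'] :: fAux ('?' :: rest) from by
              simp [fAux]]
            have hq : String.ofList ['?'] = "?" := by decide
            simp [hq]
          · rw [show altStep (pools, true) c = (pools ++ ["?", String.ofList [c]], false) from by
              simp only [altStep, if_neg hm, if_pos hc]; simp]
            rw [(ih rest (by simpa using hl)).1]
            rw [show fAux ('?' :: c :: rest) = String.ofList ['?'] :: fAux (c :: rest) from by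
              simp only [fAux]; rw [if_neg (fun hh => hm' hh.2)]]
            rw [fAux_nonq hc]
            have : String.ofList ['?'] = "?" := by decide
            simp [this]

-- ===== VERDICT (by name: the statement is the Claim_ definition above) =====
theorem parse_mask_spec : Claim_equal_parse_mask := by
  intro mask _
  show parse_mask mask = parse_mask_alt mask
  rw [parse_mask, parse_mask_alt, goA, List.drop_zero]
  exact ((goB_aux mask.toList.length mask.toList le_rfl).1 []).symm
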